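-- pv_equiv track=rewrite | github.com/lherron2/seed-from-alignment | src/lib/sample_cacofold_structures.py | pairs_to_layers
-- ===== SOURCE A (Python) =====
-- def pairs_cross(p: tuple[int, int], q: tuple[int, int]) -> bool:
--     """
--     Return True if arcs (i, j) and (k, l) cross (pseudoknot)
--     in the standard 1D arc diagram sense.
--     """
--     i, j = p
--     k, l = q
--     if i > j:
--         i, j = j, i
--     if k > l:
--         k, l = l, k
--     return (i < k < j < l) or (k < i < l < j)
--
-- def pairs_to_layers(pairs: list[tuple[int, int]]) -> list[list[tuple[int, int]]]:
--     """
--     Given a list of pairs (i, j) (sequence coords, i<j),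
--     partition them into layers so that within each layer
--     there are no crossing arcs.
--     """
--     layers: list[list[tuple[int, int]]] = []
--
--     for p in sorted(pairs):
--         placed = False
--         for layer in layers:
--             if any(pairs_cross(p, q) for q in layer):
--                 continue
--             layer.append(p)
--             placed = True
--             break
--         if not placed:
--             layers.append([p])
--
--     return layers
-- ===== SOURCE B (Python) =====
-- def _conflict(a, b, q):
--     c, d = min(q), max(q)
--     return a < c < b < d or c < a < d < b
--
-- def pairs_to_layers(pairs):
--     # Flat assignment: give every arc a layer number = mex of the layer numbers
--     # of the already-placed arcs it crosses; bucket by layer number at the end.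
--     arcs = []  # (layer_index, arc), in placement order
--     for p in sorted(pairs):
--         a, b = min(p), max(p)
--         busy = [i for i, q in arcs if _conflict(a, b, q)]
--         k = 0
--         while k in busy:
--             k += 1
--         arcs.append((k, p))
--     nlayers = max((i + 1 for i, _ in arcs), default=0)
--     return [[q for i, q in arcs if i == k] for k in range(nlayers)]
-- ===== Notes on version B (the rewrite author's own statement) =====
-- stated objective: alternative
-- what changed: Replaces the nested first-fit scan over a growing list of layers (with a placed flag and break) by a single flat pass that assigns each arc the mex of the layer indices of previously placed crossing arcs, bucketing arcs into layers once at the end.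
import Mathlib
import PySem

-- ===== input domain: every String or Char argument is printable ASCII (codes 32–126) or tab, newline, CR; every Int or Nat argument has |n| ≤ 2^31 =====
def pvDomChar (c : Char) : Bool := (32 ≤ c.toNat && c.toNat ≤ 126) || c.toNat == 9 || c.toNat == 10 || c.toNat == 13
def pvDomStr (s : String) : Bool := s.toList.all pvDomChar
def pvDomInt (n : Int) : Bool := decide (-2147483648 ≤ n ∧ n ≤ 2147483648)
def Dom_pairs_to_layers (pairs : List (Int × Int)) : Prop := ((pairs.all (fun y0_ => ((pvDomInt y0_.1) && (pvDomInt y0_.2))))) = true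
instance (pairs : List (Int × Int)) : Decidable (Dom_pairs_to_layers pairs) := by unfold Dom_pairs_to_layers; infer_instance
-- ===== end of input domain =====

-- B replaces the nested first-fit layer scan by a flat pass assigning each arc
-- the mex of the layer indices of previously placed crossing arcs, bucketing at
-- the end (objective: alternative; same asymptotic cost).


-- ===== PORT A =====
def pairs_cross (p q : Int × Int) : Bool :=
  let i := p.1; let j := p.2
  let k := q.1; let l := q.2
  let i' := if i > j then j else i
  let j' := if i > j then i else j
  let k' := if k > l then l else k
  let l' := if k > l then k else l
  decide ((i' < k' ∧ k' < j' ∧ j' < l') ∨ (k' < i' ∧ i' < l' ∧ l' < j'))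

-- the inner 'for layer in layers' loop with continue/append/break
def placeA (p : Int × Int) : List (List (Int × Int)) → List (List (Int × Int))
  | [] => [[p]]
  | layer :: rest =>
      if layer.any (fun q => pairs_cross p q) then layer :: placeA p rest
      else (layer ++ [p]) :: rest

def pairs_to_layers (pairs : List (Int × Int)) : List (List (Int × Int)) :=
  (PySem.List.sorted2 pairs (fun x => x.1) (fun x => x.2)).foldl
    (fun layers p => placeA p layers) []

-- ===== PORT B =====
def conflictB (a b : Int) (q : Int × Int) : Bool :=
  let c := min q.1 q.2; let d := max q.1 q.2
  decide ((a < c ∧ c < b ∧ b < d) ∨ (c < a ∧ a < d ∧ d < b))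

-- the 'while k in busy: k += 1' loop; fuel len(busy)+1 always suffices
def mexLoop : Nat → List Int → Int → Int
  | 0, _, k => k
  | fuel + 1, busy, k => if busy.contains k then mexLoop fuel busy (k + 1) else k

def stepB (arcs : List (Int × (Int × Int))) (p : Int × Int) : List (Int × (Int × Int)) :=
  let a := min p.1 p.2; let b := max p.1 p.2
  let busy := arcs.filterMap (fun iq => if conflictB a b iq.2 then some iq.1 else none)
  let k := mexLoop (busy.length + 1) busy 0
  arcs ++ [(k, p)]

def pairs_to_layers_alt (pairs : List (Int × Int)) : List (List (Int × Int)) :=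
  let arcs := (PySem.List.sorted2 pairs (fun x => x.1) (fun x => x.2)).foldl stepB []
  let nlayers := arcs.foldl (fun m iq => max m (iq.1 + 1)) 0
  (PySem.List.pyRange 0 nlayers 1).map
    (fun k => arcs.filterMap (fun iq => if iq.1 = k then some iq.2 else none))

-- ===== PRECONDITION & SPEC =====
def Spec_pairs_to_layers (pairs : List (Int × Int)) (out : List (List (Int × Int))) : Prop := out = pairs_to_layers_alt pairs
instance (pairs : List (Int × Int)) (out : List (List (Int × Int))) : Decidable (Spec_pairs_to_layers pairs out) := by unfold Spec_pairs_to_layers; infer_instance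

-- ===== CLAIM (what is proved, stated in full; the proofs are below) =====
def Claim_equal_pairs_to_layers : Prop := ∀ (pairs : List (Int × Int)), Dom_pairs_to_layers pairs → Spec_pairs_to_layers pairs (pairs_to_layers pairs)

-- ===== LEMMAS AND PROOFS =====

def bucket (arcs : List (Int × (Int × Int))) (k : Int) : List (Int × Int) :=
  arcs.filterMap (fun iq => if iq.1 = k then some iq.2 else none)

def nl (arcs : List (Int × (Int × Int))) : Int :=
  arcs.foldl (fun m iq => max m (iq.1 + 1)) 0

def PInv (layers : List (List (Int × Int))) (arcs : List (Int × (Int × Int))) : Prop :=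
  (∀ iq ∈ arcs, 0 ≤ iq.1 ∧ iq.1 < nl arcs) ∧
  layers = (PySem.List.pyRange 0 (nl arcs) 1).map (bucket arcs)

lemma cross_eq (p q : Int × Int) :
    pairs_cross p q = conflictB (min p.1 p.2) (max p.1 p.2) q := by
  rcases p with ⟨i, j⟩; rcases q with ⟨k, l⟩
  simp only [pairs_cross, conflictB, decide_eq_decide, min_def, max_def]
  split_ifs <;> omega

lemma bucket_append (arcs : List (Int × (Int × Int))) (k m : Int) (p : Int × Int) :
    bucket (arcs ++ [(k, p)]) m = if m = k then bucket arcs m ++ [p] else bucket arcs m := by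
  simp only [bucket, List.filterMap_append]
  split_ifs with h
  · subst h; simp
  · simp only [List.filterMap_cons, List.filterMap_nil]
    rw [if_neg (by omega)]
    simp

lemma bucket_empty (arcs : List (Int × (Int × Int))) (n : Int)
    (h : ∀ iq ∈ arcs, iq.1 < n) : bucket arcs n = [] := by
  simp only [bucket, List.filterMap_eq_nil_iff]
  intro iq hiq
  have := h iq hiq
  simp; omega

lemma nl_append (arcs : List (Int × (Int × Int))) (k : Int) (p : Int × Int) :
    nl (arcs ++ [(k, p)]) = max (nl arcs) (k + 1) := by
  simp [nl, List.foldl_append]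

lemma nl_nonneg (arcs : List (Int × (Int × Int))) : 0 ≤ nl arcs := by
  exact (PySem.List.le_foldl_max_int arcs (fun iq => iq.1 + 1) 0).1

lemma idx_lt_nl (arcs : List (Int × (Int × Int))) : ∀ iq ∈ arcs, iq.1 < nl arcs := by
  intro iq hiq
  have := (PySem.List.le_foldl_max_int arcs (fun iq => iq.1 + 1) 0).2 iq hiq
  simp only [nl]; omega

lemma any_bucket_iff (p : Int × Int) (arcs : List (Int × (Int × Int))) (m : Int) :
    ((bucket arcs m).any (fun q => pairs_cross p q) = true) ↔
    m ∈ arcs.filterMap (fun iq =>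
      if conflictB (min p.1 p.2) (max p.1 p.2) iq.2 then some iq.1 else none) := by
  simp only [bucket, List.any_eq_true, List.mem_filterMap, cross_eq]
  constructor
  · rintro ⟨q, ⟨iq, hiq, hq⟩, hc⟩
    split_ifs at hq with h
    · obtain rfl : iq.2 = q := by injection hq
      exact ⟨iq, hiq, by simp [hc, h]⟩
  · rintro ⟨iq, hiq, hq⟩
    split_ifs at hq with h
    · obtain rfl : iq.1 = m := by injection hq
      exact ⟨iq.2, ⟨iq, hiq, by simp⟩, h⟩

lemma filter_len_mono (k : Int) (l : List Int) :
    (l.filter (fun x => decide (k + 1 ≤ x))).length ≤ (l.filter (fun x => decide (k ≤ x))).length := by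
  induction l with
  | nil => simp
  | cons y s ihs =>
    simp only [List.filter_cons]
    split_ifs with h1 h2 <;> (try simp_all only [decide_eq_true_eq, List.length_cons]) <;> omega

lemma filter_len_lt (busy : List Int) (k : Int) (hk : k ∈ busy) :
    (busy.filter (fun x => decide (k + 1 ≤ x))).length
      < (busy.filter (fun x => decide (k ≤ x))).length := by
  induction busy with
  | nil => cases hk
  | cons y t ih =>
    rcases List.mem_cons.mp hk with rfl | hmem
    · simp only [List.filter_cons]
      rw [if_neg (by simp), if_pos (by simp)]
      have := filter_len_mono k t
      simp only [List.length_cons]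
      omega
    · have hit := ih hmem
      simp only [List.filter_cons]
      split_ifs with h1 h2 <;> (try simp_all only [decide_eq_true_eq, List.length_cons]) <;> omega

lemma mexLoop_spec : ∀ (fuel : Nat) (busy : List Int) (k : Int),
    (busy.filter (fun x => decide (k ≤ x))).length < fuel →
    mexLoop fuel busy k ∉ busy ∧ k ≤ mexLoop fuel busy k ∧
      ∀ j, k ≤ j → j < mexLoop fuel busy k → j ∈ busy := by
  intro fuel
  induction fuel with
  | zero => intro busy k h; exact absurd h (by omega)
  | succ fuel ih =>
    intro busy k h
    simp only [mexLoop]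
    by_cases hc : busy.contains k
    · rw [if_pos hc]
      have hkmem : k ∈ busy := by simpa using hc
      have h' : (busy.filter (fun x => decide (k + 1 ≤ x))).length < fuel := by
        have := filter_len_lt busy k hkmem; omega
      obtain ⟨h1, h2, h3⟩ := ih busy (k + 1) h'
      refine ⟨h1, by omega, fun j hj1 hj2 => ?_⟩
      rcases eq_or_lt_of_le hj1 with rfl | hlt
      · exact hkmem
      · exact h3 j (by omega) hj2
    · rw [if_neg hc]
      exact ⟨by simpa using hc, le_refl _, fun j hj1 hj2 => absurd hj2 (by omega)⟩

lemma place_walk (p : Int × Int) :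
    ∀ (d : Nat) (j n k : Int) (arcs : List (Int × (Int × Int))),
    (n - j).toNat = d → j ≤ k → k ≤ n →
    (∀ m, j ≤ m → m < k → (bucket arcs m).any (fun q => pairs_cross p q) = true) →
    (k < n → (bucket arcs k).any (fun q => pairs_cross p q) = false) →
    (∀ iq ∈ arcs, iq.1 < n) →
    placeA p ((PySem.List.pyRange j n 1).map (bucket arcs)) =
      (PySem.List.pyRange j (max n (k + 1)) 1).map (bucket (arcs ++ [(k, p)])) := by
  intro d
  induction d with
  | zero =>
    intro j n k arcs hd hjk hkn hbusy hfree hidx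
    have hk : k = n := by omega
    have hj : j = n := by omega
    subst hk; subst hj
    rw [PySem.List.pyRange_one_eq_nil (le_refl j), show max j (j + 1) = j + 1 by omega,
      PySem.List.pyRange_one_singleton]
    simp only [List.map_nil, List.map_cons, placeA]
    rw [bucket_append, if_pos rfl, bucket_empty arcs j hidx]
    simp
  | succ d ih =>
    intro j n k arcs hd hjk hkn hbusy hfree hidx
    have hjn : j < n := by omega
    rw [PySem.List.pyRange_one_cons hjn, List.map_cons]
    rcases eq_or_lt_of_le hjk with rfl | hlt
    · -- place here: layer j is free (k = j)
      have hfr := hfree hjn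
      simp only [placeA, hfr, Bool.false_eq_true, if_false]
      rw [show max n (j + 1) = n by omega, PySem.List.pyRange_one_cons hjn, List.map_cons]
      rw [bucket_append, if_pos rfl]
      refine congrArg₂ _ rfl ?_
      apply List.map_congr_left
      intro m hm
      have : j + 1 ≤ m := (PySem.List.mem_pyRange_one.mp hm).1
      rw [bucket_append, if_neg (by omega)]
    · -- layer j is busy, keep scanning
      have hb := hbusy j (le_refl j) hlt
      simp only [placeA, hb, if_true]
      rw [ih (j + 1) n k arcs (by omega) (by omega) hkn
        (fun m h1 h2 => hbusy m (by omega) h2) hfree hidx]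
      rw [PySem.List.pyRange_one_cons (show j < max n (k + 1) by omega), List.map_cons]
      rw [bucket_append, if_neg (by omega)]

lemma step_inv (layers : List (List (Int × Int))) (arcs : List (Int × (Int × Int)))
    (p : Int × Int) (h : PInv layers arcs) : PInv (placeA p layers) (stepB arcs p) := by
  obtain ⟨hidx, hlay⟩ := h
  unfold stepB
  set busy := arcs.filterMap
    (fun iq => if conflictB (min p.1 p.2) (max p.1 p.2) iq.2 then some iq.1 else none) with hbusy
  set k := mexLoop (busy.length + 1) busy 0 with hkdef
  obtain ⟨hnot, hk0, hleast⟩ := mexLoop_spec (busy.length + 1) busy 0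
    (by have := List.length_filter_le (fun x => decide ((0 : Int) ≤ x)) busy; omega)
  have hbusylt : ∀ x ∈ busy, x < nl arcs := by
    intro x hx
    rw [hbusy] at hx
    simp only [List.mem_filterMap] at hx
    obtain ⟨iq, hiq, hif⟩ := hx
    split_ifs at hif with hcf
    · obtain rfl : iq.1 = x := by injection hif
      exact idx_lt_nl arcs iq hiq
  have hkn : k ≤ nl arcs := by
    by_contra h'
    rw [not_le] at h'
    exact absurd (hbusylt (nl arcs) (hleast (nl arcs) (nl_nonneg arcs) h')) (by omega)
  have hw := place_walk p (nl arcs - 0).toNat 0 (nl arcs) k arcs rfl hk0 hkn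
    (fun m h1 h2 => (any_bucket_iff p arcs m).mpr (hleast m h1 h2))
    (fun _ => by
      rcases hh : (bucket arcs k).any (fun q => pairs_cross p q) with _ | _
      · rfl
      · exact absurd ((any_bucket_iff p arcs k).mp hh) hnot)
    (fun iq hiq => idx_lt_nl arcs iq hiq)
  constructor
  · intro iq hiq
    rw [nl_append]
    rcases List.mem_append.mp hiq with hiq' | hiq'
    · have := hidx iq hiq'
      constructor
      · exact this.1
      · omega
    · simp only [List.mem_singleton] at hiq'
      subst hiq'
      constructor
      · exact hk0
      · simp
  · rw [nl_append, hlay]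
    exact hw

lemma fold_inv (s : List (Int × Int)) :
    ∀ layers arcs, PInv layers arcs →
    PInv (s.foldl (fun l p => placeA p l) layers) (s.foldl stepB arcs) := by
  intro layers arcs h
  induction s generalizing layers arcs with
  | nil => exact h
  | cons p t ih => exact ih _ _ (step_inv layers arcs p h)

-- ===== VERDICT (by name: the statement is the Claim_ definition above) =====
theorem pairs_to_layers_spec : Claim_equal_pairs_to_layers := by
  intro pairs _
  have h := fold_inv (PySem.List.sorted2 pairs (fun x => x.1) (fun x => x.2)) [] []
    (by constructor
        · intro iq hiq; cases hiq
        · simp [nl])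
  unfold Spec_pairs_to_layers pairs_to_layers pairs_to_layers_alt
  exact h.2
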